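-- pv_equiv track=rewrite | github.com/jinsoo96/codingtest | 프로그래머스/unrated/181829. 이차원 배열 대각선 순회하기/이차원 배열 대각선 순회하기.py | solution
-- ===== SOURCE A (Python) =====
-- def solution(board, k):
--     n = len(board)
--     m = len(board[0])
--
--     total = 0
--     for i in range(n):
--         for j in range(m):
--             if i + j <= k:
--                 total += board[i][j]
--
--     return total
-- ===== SOURCE B (Python) =====
-- def solution(board, k):
--     n = len(board)
--     m = len(board[0])
--     total = 0
--     for d in range(min(k, n + m - 2) + 1):
--         for i in range(max(0, d - (m - 1)), min(n - 1, d) + 1):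
--             total += board[i][d - i]
--     return total
-- ===== Notes on version B (the rewrite author's own statement) =====
-- stated objective: alternative
-- what changed: Replaced the full row-by-row scan with a per-cell 'if i+j<=k' test by an anti-diagonal sweep over d=i+j with clamped index ranges, so only the qualifying cells are visited and the predicate disappears.
import Mathlib
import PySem

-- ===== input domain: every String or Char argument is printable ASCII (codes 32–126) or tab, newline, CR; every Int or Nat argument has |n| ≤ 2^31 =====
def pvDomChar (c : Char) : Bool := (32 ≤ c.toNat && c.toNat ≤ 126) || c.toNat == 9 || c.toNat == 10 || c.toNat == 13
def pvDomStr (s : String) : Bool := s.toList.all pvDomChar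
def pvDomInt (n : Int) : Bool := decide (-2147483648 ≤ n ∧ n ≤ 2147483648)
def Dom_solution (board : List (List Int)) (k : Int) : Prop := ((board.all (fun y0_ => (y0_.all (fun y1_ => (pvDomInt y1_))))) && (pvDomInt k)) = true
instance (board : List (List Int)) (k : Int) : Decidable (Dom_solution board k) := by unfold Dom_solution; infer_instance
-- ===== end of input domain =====

-- B replaces A's per-cell `if i+j <= k` scan by an anti-diagonal sweep (d = i+j) with clamped
-- index ranges; same return value on every input where A returns (alternative decomposition).

-- ===== PORT A =====
def solution (board : List (List Int)) (k : Int) : Int :=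
  let n : Int := (board.length : Int)
  let m : Int := ((PySem.List.pyGetD board 0 []).length : Int)
  (PySem.List.pyRange 0 n 1).foldl (fun total i =>
    (PySem.List.pyRange 0 m 1).foldl (fun total j =>
      if i + j ≤ k then total + PySem.List.pyGetD (PySem.List.pyGetD board i []) j 0
      else total) total) 0

-- ===== PORT B =====
def solution_alt (board : List (List Int)) (k : Int) : Int :=
  let n : Int := (board.length : Int)
  let m : Int := ((PySem.List.pyGetD board 0 []).length : Int)
  (PySem.List.pyRange 0 (min k (n + m - 2) + 1) 1).foldl (fun total d =>
    (PySem.List.pyRange (max 0 (d - (m - 1))) (min (n - 1) d + 1) 1).foldl (fun total i =>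
      total + PySem.List.pyGetD (PySem.List.pyGetD board i []) (d - i) 0) total) 0

-- ===== PRECONDITION & SPEC =====
-- Pre_ excludes exactly the inputs on which A raises IndexError: the empty board (board[0])
-- and ragged boards where the loop reaches a cell past an inner row's end; B raises there too.
def Pre_solution (board : List (List Int)) (k : Int) : Prop :=
  board ≠ [] ∧ ∀ i < board.length, ∀ j < (board.headD []).length,
    ((i : Int) + (j : Int) ≤ k → j < (board.getD i []).length)
instance (board : List (List Int)) (k : Int) : Decidable (Pre_solution board k) := by
  unfold Pre_solution; infer_instance

def pvWitness_solution : List (List Int) × Int := ([[1, 2], [3, 4]], 1)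

def Spec_solution (board : List (List Int)) (k : Int) (out : Int) : Prop := out = solution_alt board k
instance (board : List (List Int)) (k : Int) (out : Int) : Decidable (Spec_solution board k out) := by unfold Spec_solution; infer_instance

-- ===== CLAIM (what is proved, stated in full; the proofs are below) =====
def Claim_equal_solution : Prop := ∀ (board : List (List Int)) (k : Int), Dom_solution board k → Pre_solution board k → Spec_solution board k (solution board k)

-- ===== LEMMAS AND PROOFS =====

theorem sum_map_pyRange (f : Int → Int) (a b : Int) :
    ((PySem.List.pyRange a b 1).map f).sum = ∑ x ∈ Finset.Ico a b, f x := by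
  induction hn : (b - a).toNat generalizing a with
  | zero =>
    simp [PySem.List.pyRange_one, hn, Finset.Ico_eq_empty (by omega : ¬ a < b)]
  | succ n ih =>
    have h : a < b := by omega
    rw [PySem.List.pyRange_one_cons h, ← Finset.insert_Ico_add_one_left_eq_Ico h,
      Finset.sum_insert (by simp)]
    simp only [List.map_cons, List.sum_cons]
    rw [ih (a+1) (by omega)]

-- the rectangle filtered by i+j ≤ k, summed row by row, equals the same cells summed diagonal by diagonal
theorem diag_reindex (c : Int → Int → Int) (n m k : Int) :
    (∑ i ∈ Finset.Ico 0 n, ∑ j ∈ Finset.Ico 0 m, (if i + j ≤ k then c i j else 0))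
    = ∑ d ∈ Finset.Ico 0 (min k (n + m - 2) + 1),
        ∑ i ∈ Finset.Ico (max 0 (d - (m - 1))) (min (n - 1) d + 1), c i (d - i) := by
  rw [← Finset.sum_product', ← Finset.sum_filter, Finset.sum_sigma']
  refine Finset.sum_nbij' (fun p => ⟨p.1 + p.2, p.1⟩) (fun q => (q.2, q.1 - q.2)) ?_ ?_ ?_ ?_ ?_
  · intro p hp
    simp only [Finset.mem_filter, Finset.mem_product, Finset.mem_Ico] at hp
    simp only [Finset.mem_sigma, Finset.mem_Ico]
    omega
  · intro q hq
    simp only [Finset.mem_sigma, Finset.mem_Ico] at hq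
    simp only [Finset.mem_filter, Finset.mem_product, Finset.mem_Ico]
    omega
  · intro p hp; simp
  · intro q hq; simp
  · intro p hp; simp

theorem solution_eq (board : List (List Int)) (k : Int) :
    solution board k = solution_alt board k := by
  unfold solution solution_alt
  rw [PySem.List.foldl_congr_mem _ _
    (fun total i => total + ((PySem.List.pyRange 0 ((PySem.List.pyGetD board 0 []).length : Int) 1).map
      (fun j => if i + j ≤ k then PySem.List.pyGetD (PySem.List.pyGetD board i []) j 0 else 0)).sum) _
    (by
      intro acc i _
      rw [PySem.List.foldl_congr_mem _ _
        (fun total j => total + (if i + j ≤ k then PySem.List.pyGetD (PySem.List.pyGetD board i []) j 0 else 0)) _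
        (by intro a j _; by_cases h : i + j ≤ k <;> simp [h])]
      rw [PySem.List.foldl_add])]
  rw [PySem.List.foldl_add]
  conv_rhs =>
    rw [PySem.List.foldl_congr_mem _ _
      (fun total d => total + ((PySem.List.pyRange (max 0 (d - (((PySem.List.pyGetD board 0 []).length : Int) - 1))) (min ((board.length : Int) - 1) d + 1) 1).map
        (fun i => PySem.List.pyGetD (PySem.List.pyGetD board i []) (d - i) 0)).sum) _
      (by intro acc d _; rw [PySem.List.foldl_add])]
    rw [PySem.List.foldl_add]
  simp only [zero_add]
  rw [sum_map_pyRange, sum_map_pyRange]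
  rw [Finset.sum_congr rfl (fun i _ => sum_map_pyRange _ _ _),
      Finset.sum_congr rfl (fun d _ => sum_map_pyRange _ _ _)]
  exact diag_reindex _ _ _ _

-- ===== VERDICT (by name: the statement is the Claim_ definition above) =====
theorem solution_spec : Claim_equal_solution := by
  intro board k _ _
  unfold Spec_solution
  exact solution_eq board k
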